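-- pv_equiv track=rewrite | github.com/jerempa/PDF-OCR-and-data-analysis | data_fetchers/fetch_data_from_transfermarkt.py | add_missing_seasons
-- ===== SOURCE A (Python) =====
-- all_seasons = ['22/23', '21/22', '20/21', '19/20', '18/19', '17/18', '16/17', '15/16', '14/15', '13/14', '12/13',
--                '11/12', '10/11', '09/10', '08/09', '07/08', '06/07', '05/06', '04/05', '03/04', '02/03', '01/02', '00/01', '99/00']
--
-- def add_missing_seasons(data):
--     new_dict = {}
--     for key in data:
--         new_dict[key] = []
--
--     for season in all_seasons:
--         if season not in data['Season']:
--             new_dict['Season'].append(season)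
--             for key in data:
--                 if key != 'Season':
--                     new_dict[key].append(None)
--         else:
--             index = data['Season'].index(season)
--             for key in data:
--                 new_dict[key].append(data[key][index])
--
--     return new_dict
-- ===== SOURCE B (Python) =====
-- all_seasons = ['22/23', '21/22', '20/21', '19/20', '18/19', '17/18', '16/17', '15/16', '14/15', '13/14', '12/13',
--                '11/12', '10/11', '09/10', '08/09', '07/08', '06/07', '05/06', '04/05', '03/04', '02/03', '01/02', '00/01', '99/00']
--
-- def add_missing_seasons(data):
--     # one pass over data['Season'] builds a first-occurrence index table,
--     # then each column is produced independently (keys outer, seasons inner)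
--     index_of = {}
--     for i, s in enumerate(data['Season']):
--         index_of.setdefault(s, i)
--     new_dict = {}
--     for key, col in data.items():
--         if key == 'Season':
--             new_dict[key] = list(all_seasons)
--         else:
--             new_dict[key] = [col[index_of[s]] if s in index_of else None
--                              for s in all_seasons]
--     return new_dict
-- ===== Notes on version B (the rewrite author's own statement) =====
-- stated objective: faster
-- what changed: B transposes the loops (keys outer, seasons inner), precomputes a first-occurrence index map of the Season column in one pass, and builds each output column independently, instead of A's per-season membership test plus .index rescan of the Season column for every season.
import Mathlib
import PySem

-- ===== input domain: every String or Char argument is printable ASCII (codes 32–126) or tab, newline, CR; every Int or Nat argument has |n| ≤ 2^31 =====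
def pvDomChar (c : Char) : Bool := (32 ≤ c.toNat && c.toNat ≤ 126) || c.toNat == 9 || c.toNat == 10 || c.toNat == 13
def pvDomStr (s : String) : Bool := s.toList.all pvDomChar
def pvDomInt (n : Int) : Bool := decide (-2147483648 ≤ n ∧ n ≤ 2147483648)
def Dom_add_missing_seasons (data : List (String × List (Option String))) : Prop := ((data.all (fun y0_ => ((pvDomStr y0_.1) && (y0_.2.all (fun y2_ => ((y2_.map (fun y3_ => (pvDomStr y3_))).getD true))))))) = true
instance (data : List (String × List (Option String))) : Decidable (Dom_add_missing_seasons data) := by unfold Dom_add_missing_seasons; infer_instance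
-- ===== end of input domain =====

-- B builds a first-occurrence index map of the Season column in one pass and fills columns
-- key-by-key (keys outer, seasons inner), replacing A's per-season rescans of the Season column.


def all_seasons : List String := ["22/23", "21/22", "20/21", "19/20", "18/19", "17/18", "16/17", "15/16", "14/15", "13/14", "12/13",
  "11/12", "10/11", "09/10", "08/09", "07/08", "06/07", "05/06", "04/05", "03/04", "02/03", "01/02", "00/01", "99/00"]

-- ===== PORT A =====
def add_missing_seasons (data : List (String × List (Option String))) : List (String × List (Option String)) :=
  let d : PySem.Dict String (List (Option String)) := PySem.Dict.mk data
  let new_dict : PySem.Dict String (List (Option String)) :=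
    d.keys.foldl (fun nd key => nd.insert key []) PySem.Dict.empty
  let new_dict :=
    all_seasons.foldl (fun nd season =>
      if (some season) ∉ d.getD "Season" [] then
        let nd := nd.modify "Season" [] (fun l => l ++ [some season])
        d.keys.foldl (fun nd key =>
          if key ≠ "Season" then nd.modify key [] (fun l => l ++ [none]) else nd) nd
      else
        let index : Int := ((PySem.List.index? (d.getD "Season" []) (some season)).getD 0 : Nat)
        d.keys.foldl (fun nd key =>
          nd.modify key [] (fun l => l ++ [PySem.List.pyGetD (d.getD key []) index none])) nd)
      new_dict
  new_dict.items

-- ===== PORT B =====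
def add_missing_seasons_alt (data : List (String × List (Option String))) : List (String × List (Option String)) :=
  let sc : List (Option String) := (PySem.Dict.mk data).getD "Season" []
  let index_of : PySem.Dict (Option String) Int :=
    (PySem.List.enumerate sc).foldl (fun dd p => dd.setdefault p.2 p.1) PySem.Dict.empty
  data.map (fun kv =>
    if kv.1 = "Season" then (kv.1, all_seasons.map some)
    else (kv.1, all_seasons.map (fun s =>
      match index_of.get? (some s) with
      | some i => PySem.List.pyGetD kv.2 i none
      | none => none)))

-- ===== PRECONDITION & SPEC =====
-- Pre_ excludes: duplicate keys (impossible for a real Python dict), a missing 'Season' key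
-- (Python A raises KeyError), and columns too short for the first index of a present season
-- (Python A raises IndexError).
def Pre_add_missing_seasons (data : List (String × List (Option String))) : Prop :=
  (data.map Prod.fst).Nodup ∧ "Season" ∈ data.map Prod.fst ∧
  ∀ kv ∈ data, ∀ s ∈ all_seasons,
    (some s) ∈ (PySem.Dict.mk data).getD "Season" [] →
      ((PySem.List.index? ((PySem.Dict.mk data).getD "Season" []) (some s)).getD 0) < kv.2.length
instance (data : List (String × List (Option String))) : Decidable (Pre_add_missing_seasons data) := by unfold Pre_add_missing_seasons; infer_instance

def pvWitness_add_missing_seasons : (List (String × List (Option String))) :=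
  [("Season", [some "22/23", none]), ("Goals", [some "5", some "1"])]

def Spec_add_missing_seasons (data : List (String × List (Option String))) (out : List (String × List (Option String))) : Prop := out = add_missing_seasons_alt data
instance (data : List (String × List (Option String))) (out : List (String × List (Option String))) : Decidable (Spec_add_missing_seasons data out) := by unfold Spec_add_missing_seasons; infer_instance

-- ===== CLAIM (what is proved, stated in full; the proofs are below) =====
def Claim_equal_add_missing_seasons : Prop := ∀ (data : List (String × List (Option String))), Dom_add_missing_seasons data → Pre_add_missing_seasons data → Spec_add_missing_seasons data (add_missing_seasons data)

-- ===== LEMMAS AND PROOFS =====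


theorem get?_mk_map_shape (ks : List String) (h : String → List (Option String)) (k0 : String)
    (hk : k0 ∈ ks) :
    (PySem.Dict.mk (ks.map (fun k => (k, h k)))).get? k0 = some (h k0) := by
  induction ks with
  | nil => simp at hk
  | cons a t ih =>
    simp only [List.map_cons, PySem.Dict.get?_mk_cons]
    by_cases hak : a = k0
    · simp [hak]
    · simp only [beq_iff_eq, hak, if_false]
      exact ih ((List.mem_cons.1 hk).resolve_left (fun h1 => hak h1.symm))

theorem getD_mk_map_shape (ks : List String) (h : String → List (Option String)) (k0 : String)
    (hk : k0 ∈ ks) :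
    (PySem.Dict.mk (ks.map (fun k => (k, h k)))).getD k0 [] = h k0 := by
  simp [PySem.Dict.getD, get?_mk_map_shape ks h k0 hk]

theorem contains_mk_map_shape (ks : List String) (h : String → List (Option String)) (k0 : String)
    (hk : k0 ∈ ks) :
    (PySem.Dict.mk (ks.map (fun k => (k, h k)))).contains k0 = true := by
  simp only [PySem.Dict.contains, List.any_eq_true]
  exact ⟨(k0, h k0), List.mem_map_of_mem hk, by simp⟩

theorem modify_mk_map_shape (ks : List String) (h : String → List (Option String)) (k0 : String)
    (hk : k0 ∈ ks) (f : List (Option String) → List (Option String)) :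
    (PySem.Dict.mk (ks.map (fun k => (k, h k)))).modify k0 [] f
      = PySem.Dict.mk (ks.map (fun k => (k, if k = k0 then f (h k) else h k))) := by
  simp only [PySem.Dict.modify, PySem.Dict.insert, contains_mk_map_shape ks h k0 hk,
    getD_mk_map_shape ks h k0 hk, if_true, List.map_map]
  congr 1
  apply List.map_congr_left
  intro a _
  by_cases hak : a = k0 <;> simp [hak]
theorem foldl_modify_map_shape (ks : List String) (ks' : List String)
    (hsub : ∀ a ∈ ks', a ∈ ks) (hnd : ks'.Nodup)
    (F : String → List (Option String) → List (Option String)) (h : String → List (Option String)) :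
    ks'.foldl (fun nd key => nd.modify key [] (F key)) (PySem.Dict.mk (ks.map (fun k => (k, h k))))
      = PySem.Dict.mk (ks.map (fun k => (k, if k ∈ ks' then F k (h k) else h k))) := by
  induction ks' generalizing h with
  | nil => simp
  | cons a t ih =>
    have hat : a ∉ t := (List.nodup_cons.1 hnd).1
    simp only [List.foldl_cons]
    rw [modify_mk_map_shape ks h a (hsub a (by simp))]
    rw [ih (fun b hb => hsub b (by simp [hb])) (List.nodup_cons.1 hnd).2]
    congr 1
    apply List.map_congr_left
    intro k hk
    by_cases h1 : k ∈ t
    · have hka : k ≠ a := fun e => hat (e ▸ h1)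
      simp [h1, hka]
    · by_cases h2 : k = a <;> simp [h1, h2, hat]

theorem foldl_modify_if_map_shape (ks : List String) (ks' : List String)
    (hsub : ∀ a ∈ ks', a ∈ ks) (hnd : ks'.Nodup)
    (F : String → List (Option String) → List (Option String)) (h : String → List (Option String)) :
    ks'.foldl (fun nd key => if key ≠ "Season" then nd.modify key [] (F key) else nd)
        (PySem.Dict.mk (ks.map (fun k => (k, h k))))
      = PySem.Dict.mk (ks.map (fun k => (k, if k ∈ ks' ∧ k ≠ "Season" then F k (h k) else h k))) := by
  induction ks' generalizing h with
  | nil => simp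
  | cons a t ih =>
    have hat : a ∉ t := (List.nodup_cons.1 hnd).1
    simp only [List.foldl_cons]
    by_cases ha : a = "Season"
    · simp only [ha, ne_eq, not_true_eq_false, if_false]
      rw [ih (fun b hb => hsub b (by simp [hb])) (List.nodup_cons.1 hnd).2]
      congr 1
      apply List.map_congr_left
      intro k hk
      by_cases h1 : k ∈ t
      · have : k ≠ "Season" → (k ∈ t ∧ k ≠ "Season" ↔ k ∈ a :: t ∧ k ≠ "Season") := by simp [h1]
        by_cases h2 : k = "Season" <;> simp [h1, h2]
      · by_cases h2 : k = a <;> simp [h1, h2, ha]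
    · simp only [ne_eq, ha, not_false_eq_true, if_true]
      rw [modify_mk_map_shape ks h a (hsub a (by simp))]
      rw [ih (fun b hb => hsub b (by simp [hb])) (List.nodup_cons.1 hnd).2]
      congr 1
      apply List.map_congr_left
      intro k hk
      by_cases h1 : k ∈ t
      · have hka : k ≠ a := fun e => hat (e ▸ h1)
        have has : ¬ "Season" = a := fun e => ha e.symm
        by_cases h2 : k = "Season" <;> simp [h1, h2, hka, has]
      · by_cases h2 : k = a
        · simp [h2, ha, hat]
        · have has : ¬ "Season" = a := fun e => ha e.symm
          by_cases h3 : k = "Season" <;> simp [h1, h2, h3, has]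

theorem init_loop (ks : List String) (hnd : ks.Nodup) :
    ks.foldl (fun nd key => nd.insert key ([] : List (Option String))) PySem.Dict.empty
      = PySem.Dict.mk (ks.map (fun k => (k, []))) := by
  apply PySem.Dict.ext
  have := PySem.Dict.items_foldl_insert_fresh (l := ks) (k := fun a => a)
    (v := fun _ => ([] : List (Option String))) (d := PySem.Dict.empty)
    (by intro a _; simp [PySem.Dict.contains_empty]) (by simpa)
  simpa [PySem.Dict.empty] using this

def gcol (sc : List (Option String)) (d : PySem.Dict String (List (Option String)))
    (k : String) (s : String) : Option String :=
  if (some s) ∈ sc then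
    PySem.List.pyGetD (d.getD k []) (((PySem.List.index? sc (some s)).getD 0 : Nat) : Int) none
  else if k = "Season" then some s else none


def stepA (data : List (String × List (Option String))) :
    PySem.Dict String (List (Option String)) → String → PySem.Dict String (List (Option String)) :=
  fun nd season =>
      if (some season) ∉ (PySem.Dict.mk data).getD "Season" [] then
        let nd := nd.modify "Season" [] (fun l => l ++ [some season])
        (PySem.Dict.mk data).keys.foldl (fun nd key =>
          if key ≠ "Season" then nd.modify key [] (fun l => l ++ [none]) else nd) nd
      else
        let index : Int := ((PySem.List.index? ((PySem.Dict.mk data).getD "Season" []) (some season)).getD 0 : Nat)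
        (PySem.Dict.mk data).keys.foldl (fun nd key =>
          nd.modify key [] (fun l => l ++ [PySem.List.pyGetD ((PySem.Dict.mk data).getD key []) index none])) nd

theorem stepA_shape (data : List (String × List (Option String)))
    (hnd : (data.map Prod.fst).Nodup)
    (hS : "Season" ∈ data.map Prod.fst)
    (s : String) (h : String → List (Option String)) :
    stepA data (PySem.Dict.mk ((data.map Prod.fst).map (fun k => (k, h k)))) s
      = PySem.Dict.mk ((data.map Prod.fst).map (fun k =>
          (k, h k ++ [gcol ((PySem.Dict.mk data).getD "Season" []) (PySem.Dict.mk data) k s]))) := by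
  have hkeys : (PySem.Dict.mk data).keys = data.map Prod.fst := rfl
  unfold stepA
  by_cases hmem : (some s) ∈ (PySem.Dict.mk data).getD "Season" []
  · rw [if_neg (by simpa using hmem)]
    rw [hkeys, foldl_modify_map_shape _ _ (fun a ha => ha) hnd _ h]
    congr 1
    apply List.map_congr_left
    intro k hk
    simp only [hk, if_true, gcol, hmem]
  · rw [if_pos (by simpa using hmem)]
    simp only []
    rw [modify_mk_map_shape _ h "Season" hS]
    rw [hkeys, foldl_modify_if_map_shape _ _ (fun a ha => ha) hnd _ _]
    congr 1
    apply List.map_congr_left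
    intro k hk
    by_cases hks : k = "Season"
    · simp [hks, gcol, hmem]
    · simp [hks, hk, gcol, hmem]

theorem outer_loop (data : List (String × List (Option String)))
    (hnd : (data.map Prod.fst).Nodup)
    (hS : "Season" ∈ data.map Prod.fst)
    (ss : List String) (h : String → List (Option String)) :
    ss.foldl (stepA data) (PySem.Dict.mk ((data.map Prod.fst).map (fun k => (k, h k))))
      = PySem.Dict.mk ((data.map Prod.fst).map (fun k =>
          (k, h k ++ ss.map (gcol ((PySem.Dict.mk data).getD "Season" []) (PySem.Dict.mk data) k)))) := by
  induction ss generalizing h with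
  | nil => simp
  | cons s t ih =>
    rw [List.foldl_cons, stepA_shape data hnd hS s h, ih]
    congr 1
    apply List.map_congr_left
    intro k hk
    simp [List.append_assoc]


theorem index_of_get? (l : List (Option String)) (n : Int) (d0 : PySem.Dict (Option String) Int)
    (x : Option String) :
    (((PySem.List.enumerate l n).foldl (fun dd p => dd.setdefault p.2 p.1) d0).get? x)
      = (d0.get? x).or ((PySem.List.index? l x).map (fun i => n + (i : Int))) := by
  induction l generalizing n d0 with
  | nil => simp [PySem.List.enumerate]
  | cons a t ih =>
    rw [PySem.List.enumerate_cons]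
    simp only [List.foldl_cons]
    rw [ih]
    by_cases hax : x = a
    · subst hax
      rw [PySem.Dict.get?_setdefault_self d0 x n]
      rw [PySem.List.index?_cons_self]
      cases h0 : d0.get? x <;> simp
    · rw [PySem.Dict.get?_setdefault_of_ne d0 n hax]
      rw [PySem.List.index?_cons_of_ne t (fun e => hax e.symm)]
      cases h1 : PySem.List.index? t x <;> cases h0 : d0.get? x <;>
        simp <;> omega

theorem pyGetD_index? (l : List (Option String)) (v : Option String) (i : Nat)
    (hi : PySem.List.index? l v = some i) :
    PySem.List.pyGetD l ((i : Nat) : Int) none = v := by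
  obtain ⟨hk, hv, -⟩ := PySem.List.getElem_of_index?_eq_some hi
  rw [PySem.List.pyGetD_natCast]
  rw [List.getD_eq_getElem _ _ hk]
  exact hv

theorem getD_of_mem (data : List (String × List (Option String)))
    (hnd : (data.map Prod.fst).Nodup) (kv : String × List (Option String)) (hkv : kv ∈ data) :
    (PySem.Dict.mk data).getD kv.1 [] = kv.2 := by
  exact PySem.Dict.getD_of_mem_items (PySem.Dict.mk data) (by exact hkv) (by exact hnd) []

-- ===== VERDICT (by name: the statement is the Claim_ definition above) =====

theorem add_missing_seasons_spec : Claim_equal_add_missing_seasons := by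
  intro data _ hpre
  obtain ⟨hnd, hS, -⟩ := hpre
  unfold Spec_add_missing_seasons
  have hkeys : (PySem.Dict.mk data).keys = data.map Prod.fst := rfl
  have hA : add_missing_seasons data
      = (all_seasons.foldl (stepA data)
          ((PySem.Dict.mk data).keys.foldl (fun nd key => nd.insert key []) PySem.Dict.empty)).items := rfl
  rw [hA, hkeys, init_loop _ hnd, outer_loop data hnd hS all_seasons (fun _ => [])]
  have hB : add_missing_seasons_alt data
      = data.map (fun kv =>
          if kv.1 = "Season" then (kv.1, all_seasons.map some)
          else (kv.1, all_seasons.map (fun s =>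
            match ((PySem.List.enumerate ((PySem.Dict.mk data).getD "Season" [])).foldl
                (fun dd p => dd.setdefault p.2 p.1) PySem.Dict.empty).get? (some s) with
            | some i => PySem.List.pyGetD kv.2 i none
            | none => none))) := rfl
  rw [hB]
  show ((data.map Prod.fst).map _ : List (String × List (Option String))) = _
  rw [List.map_map]
  apply List.map_congr_left
  intro kv hkv
  have hio : ∀ s : String,
      ((PySem.List.enumerate ((PySem.Dict.mk data).getD "Season" [])).foldl
          (fun dd p => dd.setdefault p.2 p.1) PySem.Dict.empty).get? (some s)
        = (PySem.List.index? ((PySem.Dict.mk data).getD "Season" []) (some s)).map (fun i => (i : Int)) := by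
    intro s
    rw [index_of_get?]
    simp [PySem.Dict.get?_empty]
  by_cases hks : kv.1 = "Season"
  · simp only [Function.comp_apply, hks, if_true, List.nil_append]
    refine Prod.ext rfl ?_
    dsimp only
    apply List.map_congr_left
    intro s _
    unfold gcol
    by_cases hm : (some s) ∈ (PySem.Dict.mk data).getD "Season" []
    · rw [if_pos hm]
      obtain ⟨i, hi⟩ := Option.isSome_iff_exists.1
        ((PySem.List.index?_isSome_iff _ _).2 hm)
      rw [hi]
      exact pyGetD_index? _ _ i hi
    · rw [if_neg hm, if_pos rfl]
  · simp only [Function.comp_apply, hks, if_false, List.nil_append]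
    refine Prod.ext rfl ?_
    dsimp only
    apply List.map_congr_left
    intro s _
    rw [hio s]
    unfold gcol
    by_cases hm : (some s) ∈ (PySem.Dict.mk data).getD "Season" []
    · rw [if_pos hm]
      obtain ⟨i, hi⟩ := Option.isSome_iff_exists.1
        ((PySem.List.index?_isSome_iff _ _).2 hm)
      rw [hi, getD_of_mem data hnd kv hkv]
      rfl
    · rw [if_neg hm, if_neg hks]
      have : PySem.List.index? ((PySem.Dict.mk data).getD "Season" []) (some s) = none := by
        rw [PySem.List.index?_eq_none_iff]; exact hm
      rw [this]
      rfl
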